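-- pv_equiv track=rewrite | github.com/ashsek/Competetive-Codes | WALk.py | maxfinder
-- ===== SOURCE A (Python) =====
-- def maxfinder(l):
--     j = len(l)
--     k = j
--     error = 0
--     for i in l:
--         if i > j:
--             error += i - j
--             j += i-j
--         j -= 1
--     return(k + error)
-- ===== SOURCE B (Python) =====
-- def maxfinder(l):
--     return max(len(l), max((v + i for i, v in enumerate(l)), default=0))
-- ===== Notes on version B (the rewrite author's own statement) =====
-- stated objective: simpler
-- what changed: Replaced A's sequential running-state loop (decrementing budget j plus accumulated error) by the closed-form max(len(l), max_i(l[i]+i)), using the invariant that A's k+error equals that maximum.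
import Mathlib
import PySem

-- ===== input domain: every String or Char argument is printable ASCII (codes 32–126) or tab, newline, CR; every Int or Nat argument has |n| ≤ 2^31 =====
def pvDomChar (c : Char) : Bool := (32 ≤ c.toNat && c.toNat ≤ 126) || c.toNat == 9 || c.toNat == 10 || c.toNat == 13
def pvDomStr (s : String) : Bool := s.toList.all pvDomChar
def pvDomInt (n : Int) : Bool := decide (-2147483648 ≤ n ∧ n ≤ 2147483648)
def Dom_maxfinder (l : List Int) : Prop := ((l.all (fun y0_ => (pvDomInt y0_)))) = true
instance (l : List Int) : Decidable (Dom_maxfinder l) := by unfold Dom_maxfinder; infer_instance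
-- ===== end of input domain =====

-- B replaces A's running-state loop (budget j and accumulated error) by the closed form
-- max(len(l), max_i (l[i] + i)); objective: simpler.

-- ===== PORT A =====
-- A's loop body: if i > j then (error += i - j; j += i - j); then j -= 1.
def maxfinderStep (s : Int × Int) (i : Int) : Int × Int :=
  let s' := if i > s.1 then (s.1 + (i - s.1), s.2 + (i - s.1)) else s
  (s'.1 - 1, s'.2)

def maxfinder (l : List Int) : Int :=
  let j : Int := l.length
  let k := j
  let st := l.foldl maxfinderStep (j, 0)
  k + st.2

-- ===== PORT B =====
-- the generator (v + i for i, v in enumerate(l)), starting at index p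
def idxSums (l : List Int) (p : Int) : List Int :=
  match l with
  | [] => []
  | x :: r => (x + p) :: idxSums r (p + 1)

-- max(gen, default=0): 0 on an empty sequence, else the maximum of its elements
def maxfinder_alt (l : List Int) : Int :=
  max (l.length : Int)
    (match idxSums l 0 with
     | [] => 0
     | h :: t => t.foldl max h)

-- ===== PRECONDITION & SPEC =====
def Spec_maxfinder (l : List Int) (out : Int) : Prop := out = maxfinder_alt l
instance (l : List Int) (out : Int) : Decidable (Spec_maxfinder l out) := by unfold Spec_maxfinder; infer_instance

-- ===== CLAIM (what is proved, stated in full; the proofs are below) =====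
def Claim_equal_maxfinder : Prop := ∀ (l : List Int), Dom_maxfinder l → Spec_maxfinder l (maxfinder l)

-- ===== LEMMAS AND PROOFS =====

-- common characterisation: runM r j = max j (max over p of (r[p] + p)) shifted recursion
def runM : List Int → Int → Int
  | [], j => j
  | x :: r, j => runM r (max j x - 1) + 1

theorem maxfinderStep_eq (s : Int × Int) (i : Int) :
    maxfinderStep s i = (max s.1 i - 1, s.2 + (max s.1 i - s.1)) := by
  by_cases h : i > s.1 <;> simp [maxfinderStep, h, Prod.ext_iff] <;> omega

theorem foldA_eq (r : List Int) : ∀ (j e : Int),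
    r.foldl maxfinderStep (j, e) = (runM r j - r.length, e + runM r j - j) := by
  induction r with
  | nil => intro j e; simp [runM]
  | cons x r ih =>
    intro j e
    simp only [List.foldl_cons, maxfinderStep_eq, ih, runM, List.length_cons, Prod.ext_iff]
    push_cast
    constructor <;> omega

theorem idxSums_shift (r : List Int) : ∀ (p c : Int),
    (idxSums r (p + 1)).foldl max c = (idxSums r p).foldl max (c - 1) + 1 := by
  induction r with
  | nil => intro p c; simp [idxSums]
  | cons x s ih =>
    intro p c
    simp only [idxSums, List.foldl_cons, ih]
    have hb : max c (x + (p + 1)) - 1 - 1 = max (c - 1) (x + p) - 1 := by omega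
    rw [hb]

theorem runM_foldl (r : List Int) : ∀ (j : Int),
    runM r j = (idxSums r 0).foldl max j := by
  induction r with
  | nil => intro j; simp [runM, idxSums]
  | cons x s ih =>
    intro j
    have h := idxSums_shift s 0 (max j x)
    simp only [runM, idxSums, List.foldl_cons, ih]
    rw [← h]
    norm_num

theorem max_foldl_max (t : List Int) : ∀ (a b : Int),
    max a (t.foldl max b) = t.foldl max (max a b) := by
  induction t with
  | nil => intro a b; simp
  | cons x s ih =>
    intro a b
    simp only [List.foldl_cons, ih, max_assoc]

-- ===== VERDICT (by name: the statement is the Claim_ definition above) =====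
theorem maxfinder_spec : Claim_equal_maxfinder := by
  intro l _
  unfold Spec_maxfinder maxfinder maxfinder_alt
  simp only [foldA_eq]
  rw [runM_foldl]
  cases h : idxSums l 0 with
  | nil =>
    cases l with
    | nil => simp
    | cons x r => simp [idxSums] at h
  | cons a t =>
    simp only [List.foldl_cons]
    rw [max_foldl_max]
    have hn : (0 : Int) ≤ l.length := by positivity
    have : max (l.length : Int) a = max a (l.length : Int) := max_comm _ _
    omega
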